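-- pv_equiv track=rewrite | github.com/borrvick/sync-safe | services/discovery/_orchestrator.py | _merge_candidates
-- ===== SOURCE A (Python) =====
-- def _merge_candidates(
--     lastfm: list[tuple[str, str, int]],
--     spotify: list[tuple[str, str]],
--     max_results: int,
-- ) -> list[tuple[str, str, int]]:
--     """
--     Round-robin interleave Last.fm and Spotify candidates; dedup by normalised key.
--
--     Normalisation: lowercase, strip leading/trailing whitespace.  The first
--     occurrence of each (artist, title) pair is kept; duplicates are dropped.
--     Last.fm entries carry their listener counts; Spotify entries carry 0.
--
--     Pure function — no I/O.
--     """
--     seen: set[tuple[str, str]] = set()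
--     merged: list[tuple[str, str, int]] = []
--
--     # Convert Spotify pairs to the same 3-tuple shape (listeners=0)
--     spotify_triples: list[tuple[str, str, int]] = [
--         (art, ttl, 0) for art, ttl in spotify
--     ]
--
--     # Round-robin interleave
--     for lfm, spot in zip(lastfm, spotify_triples):
--         for entry in (lfm, spot):
--             key = (entry[0].lower().strip(), entry[1].lower().strip())
--             if key not in seen:
--                 seen.add(key)
--                 merged.append(entry)
--             if len(merged) >= max_results:
--                 return merged
--
--     # Drain whichever list is longer
--     for remainder in (lastfm[len(spotify_triples):], spotify_triples[len(lastfm):]):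
--         for entry in remainder:
--             key = (entry[0].lower().strip(), entry[1].lower().strip())
--             if key not in seen:
--                 seen.add(key)
--                 merged.append(entry)
--             if len(merged) >= max_results:
--                 return merged
--
--     return merged
-- ===== SOURCE B (Python) =====
-- def _merge_candidates(lastfm, spotify, max_results):
--     # Rank-and-sort round-robin: lastfm[i] gets rank 2*i, spotify[i] gets rank
--     # 2*i+1, so sorting by rank yields the interleaved order (including the
--     # longer list's tail).  Then one dict of first occurrences deduplicates;
--     # the limit check fires only when a new entry is admitted.
--     ranked = [(2 * i, entry) for i, entry in enumerate(lastfm)]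
--     ranked += [(2 * i + 1, (art, ttl, 0)) for i, (art, ttl) in enumerate(spotify)]
--     ranked.sort(key=lambda p: p[0])
--     first = {}
--     for _, entry in ranked:
--         key = (entry[0].lower().strip(), entry[1].lower().strip())
--         if key not in first:
--             first[key] = entry
--             if len(first) >= max_results:
--                 break
--     return list(first.values())
-- ===== Notes on version B (the rewrite author's own statement) =====
-- stated objective: alternative
-- what changed: A's three interleaving loops (zip pairs plus two remainder drains) with a seen-set, a merged list and three early-return sites are replaced by a rank-and-sort schedule (lastfm[i] ranked 2i, spotify[i] ranked 2i+1, sorted by rank) followed by one pass building a dict of first occurrences whose values() are the result, with a single break when the dict reaches max_results.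
import Mathlib
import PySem

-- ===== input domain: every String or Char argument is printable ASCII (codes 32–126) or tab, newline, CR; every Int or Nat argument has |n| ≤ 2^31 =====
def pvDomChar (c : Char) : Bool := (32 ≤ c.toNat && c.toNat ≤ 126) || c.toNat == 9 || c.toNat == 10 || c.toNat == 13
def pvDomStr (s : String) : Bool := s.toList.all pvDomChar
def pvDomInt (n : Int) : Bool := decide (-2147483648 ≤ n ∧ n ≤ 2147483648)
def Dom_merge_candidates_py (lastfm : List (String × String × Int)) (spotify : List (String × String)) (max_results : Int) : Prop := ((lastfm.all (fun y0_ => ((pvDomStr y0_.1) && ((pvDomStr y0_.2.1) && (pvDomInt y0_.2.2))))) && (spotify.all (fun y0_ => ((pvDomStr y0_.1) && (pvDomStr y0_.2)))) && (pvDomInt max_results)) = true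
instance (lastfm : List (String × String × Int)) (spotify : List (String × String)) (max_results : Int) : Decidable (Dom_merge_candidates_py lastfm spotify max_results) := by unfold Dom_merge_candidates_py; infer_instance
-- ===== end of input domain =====

-- B replaces A's three interleaving loops + seen-set/merged-list with a rank-and-sort
-- schedule followed by one first-occurrence-dict pass (objective: alternative algorithm, same result).

-- ===== PORT A =====
-- normalised key: (entry[0].lower().strip(), entry[1].lower().strip())
def pvKeyA (e : String × String × Int) : String × String :=
  (PySem.Str.strip (PySem.Str.lower e.1), PySem.Str.strip (PySem.Str.lower e.2.1))

-- one iteration of A's inner 'for entry in …' body: update (seen, merged), report early return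
def pvStepA (mx : Int) (st : PySem.Set (String × String) × List (String × String × Int))
    (e : String × String × Int) :
    (PySem.Set (String × String) × List (String × String × Int)) × Bool :=
  let key := pvKeyA e
  let st' := if PySem.Set.contains st.1 key then st else (PySem.Set.add st.1 key, st.2 ++ [e])
  (st', decide (mx ≤ PySem.List.len st'.2))

-- 'for lfm, spot in zip(...): for entry in (lfm, spot): …' (inr = early 'return merged')
def pvLoopPairsA (mx : Int) :
    List ((String × String × Int) × (String × String × Int)) →
    PySem.Set (String × String) × List (String × String × Int) →
    (PySem.Set (String × String) × List (String × String × Int)) ⊕ List (String × String × Int)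
  | [], st => .inl st
  | (lfm, spot) :: rest, st =>
    let r1 := pvStepA mx st lfm
    if r1.2 then .inr r1.1.2 else
      let r2 := pvStepA mx r1.1 spot
      if r2.2 then .inr r2.1.2 else pvLoopPairsA mx rest r2.1

-- 'for entry in remainder: …' (same body, over one list)
def pvLoopListA (mx : Int) :
    List (String × String × Int) →
    PySem.Set (String × String) × List (String × String × Int) →
    (PySem.Set (String × String) × List (String × String × Int)) ⊕ List (String × String × Int)
  | [], st => .inl st
  | e :: rest, st =>
    let r := pvStepA mx st e
    if r.2 then .inr r.1.2 else pvLoopListA mx rest r.1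

def merge_candidates_py (lastfm : List (String × String × Int)) (spotify : List (String × String)) (max_results : Int) : List (String × String × Int) :=
  let spotify_triples := spotify.map (fun p => (p.1, p.2, (0 : Int)))
  match pvLoopPairsA max_results (lastfm.zip spotify_triples) (PySem.Set.empty, []) with
  | .inr m => m
  | .inl st =>
    match pvLoopListA max_results
        (PySem.List.slice lastfm (some (PySem.List.len spotify_triples)) none) st with
    | .inr m => m
    | .inl st2 =>
      match pvLoopListA max_results
          (PySem.List.slice spotify_triples (some (PySem.List.len lastfm)) none) st2 with
      | .inr m => m
      | .inl st3 => st3.2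

-- ===== PORT B =====
def pvKeyB (e : String × String × Int) : String × String :=
  (PySem.Str.strip (PySem.Str.lower e.1), PySem.Str.strip (PySem.Str.lower e.2.1))

-- 'for _, entry in ranked: … if key not in first: first[key]=entry; if len(first)>=max: break'
def pvScanB (mx : Int) :
    List (Int × (String × String × Int)) →
    PySem.Dict (String × String) (String × String × Int) →
    PySem.Dict (String × String) (String × String × Int)
  | [], d => d
  | (_, e) :: rest, d =>
    let key := pvKeyB e
    if PySem.Dict.contains d key then pvScanB mx rest d
    else
      let d' := PySem.Dict.insert d key e
      if decide (mx ≤ (PySem.Dict.size d' : Int)) then d' else pvScanB mx rest d'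

def merge_candidates_py_alt (lastfm : List (String × String × Int)) (spotify : List (String × String)) (max_results : Int) : List (String × String × Int) :=
  let ranked := (PySem.List.enumerate lastfm 0).map (fun p => (2 * p.1, p.2))
      ++ (PySem.List.enumerate spotify 0).map (fun p => (2 * p.1 + 1, (p.2.1, p.2.2, (0 : Int))))
  let ranked := PySem.List.sorted ranked (fun p => p.1) false
  PySem.Dict.values (pvScanB max_results ranked PySem.Dict.empty)

-- ===== PRECONDITION & SPEC =====
def Spec_merge_candidates_py (lastfm : List (String × String × Int)) (spotify : List (String × String)) (max_results : Int) (out : List (String × String × Int)) : Prop := out = merge_candidates_py_alt lastfm spotify max_results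
instance (lastfm : List (String × String × Int)) (spotify : List (String × String)) (max_results : Int) (out : List (String × String × Int)) : Decidable (Spec_merge_candidates_py lastfm spotify max_results out) := by unfold Spec_merge_candidates_py; infer_instance

-- ===== CLAIM (what is proved, stated in full; the proofs are below) =====
def Claim_equal_merge_candidates_py : Prop := ∀ (lastfm : List (String × String × Int)) (spotify : List (String × String)) (max_results : Int), Dom_merge_candidates_py lastfm spotify max_results → Spec_merge_candidates_py lastfm spotify max_results (merge_candidates_py lastfm spotify max_results)

-- ===== LEMMAS AND PROOFS =====

-- result of A's loops: the early-returned list, or the final merged list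
def pvRes (r : (PySem.Set (String × String) × List (String × String × Int)) ⊕ List (String × String × Int)) :
    List (String × String × Int) :=
  match r with
  | .inl st => st.2
  | .inr m => m

lemma pvLoopListA_append (mx : Int) (xs ys : List (String × String × Int))
    (st : PySem.Set (String × String) × List (String × String × Int)) :
    pvLoopListA mx (xs ++ ys) st =
      (match pvLoopListA mx xs st with
       | .inl st' => pvLoopListA mx ys st'
       | .inr m => .inr m) := by
  induction xs generalizing st with
  | nil => simp [pvLoopListA]
  | cons e rest ih =>
      simp only [List.cons_append, pvLoopListA]
      by_cases h : (pvStepA mx st e).2 <;> simp [h, ih]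

-- A's pair loop is A's scan over the flattened pairs
lemma pvLoopPairsA_eq_scan (mx : Int)
    (ps : List ((String × String × Int) × (String × String × Int)))
    (st : PySem.Set (String × String) × List (String × String × Int)) :
    pvLoopPairsA mx ps st = pvLoopListA mx (ps.flatMap (fun p => [p.1, p.2])) st := by
  induction ps generalizing st with
  | nil => simp [pvLoopPairsA, pvLoopListA]
  | cons p rest ih =>
      obtain ⟨lfm, spot⟩ := p
      rw [show ((lfm, spot) :: rest).flatMap (fun p => [p.1, p.2])
            = lfm :: spot :: rest.flatMap (fun p => [p.1, p.2]) by simp [List.flatMap]]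
      simp only [pvLoopPairsA, pvLoopListA]
      by_cases h1 : (pvStepA mx st lfm).2 <;> simp [h1]
      by_cases h2 : (pvStepA mx (pvStepA mx st lfm).1 spot).2 <;> simp [h2, ih]

-- chaining A's early-return loops over three lists = one loop over their concatenation
lemma pvChain_eq (mx : Int) (F dA dB : List (String × String × Int)) :
    (match pvLoopListA mx F (PySem.Set.empty, []) with
     | .inr m => m
     | .inl st =>
       match pvLoopListA mx dA st with
       | .inr m => m
       | .inl st2 =>
         match pvLoopListA mx dB st2 with
         | .inr m => m
         | .inl st3 => st3.2)
    = pvRes (pvLoopListA mx (F ++ (dA ++ dB)) (PySem.Set.empty, [])) := by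
  rw [pvLoopListA_append]
  rcases h1 : pvLoopListA mx F (PySem.Set.empty, []) with st1 | m
  · dsimp only
    rw [pvLoopListA_append]
    rcases h2 : pvLoopListA mx dA st1 with st2 | m
    · rcases h3 : pvLoopListA mx dB st2 with st3 | m <;> simp [pvRes, h3]
    · simp [pvRes]
  · simp [pvRes]

-- A = one scan over the full round-robin stream
lemma pvA_eq_scan (lastfm : List (String × String × Int)) (spotify : List (String × String)) (mx : Int) :
    merge_candidates_py lastfm spotify mx =
      pvRes (pvLoopListA mx
        ((lastfm.zip (spotify.map (fun p => (p.1, p.2, (0 : Int))))).flatMap (fun p => [p.1, p.2])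
          ++ (lastfm.drop spotify.length
            ++ (spotify.map (fun p => (p.1, p.2, (0 : Int)))).drop lastfm.length))
        (PySem.Set.empty, [])) := by
  unfold merge_candidates_py
  simp only [PySem.List.len_eq, PySem.List.slice_from_natCast, pvLoopPairsA_eq_scan,
    List.length_map]
  exact pvChain_eq mx _ _ _

-- the round-robin schedule: lastfm[j] at rank 2j, spotify[j] at rank 2j+1, in rank order
def pvRanked (i : Int) :
    List (String × String × Int) → List (String × String × Int) → List (Int × (String × String × Int))
  | [], b => (PySem.List.enumerate b i).map (fun p => (2 * p.1 + 1, p.2))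
  | x :: a, [] => (PySem.List.enumerate (x :: a) i).map (fun p => (2 * p.1, p.2))
  | x :: a, y :: b => (2 * i, x) :: (2 * i + 1, y) :: pvRanked (i + 1) a b

lemma pv_enumerate_map_pad (spotify : List (String × String)) (i : Int) :
    (PySem.List.enumerate spotify i).map (fun p => (2 * p.1 + 1, (p.2.1, p.2.2, (0 : Int))))
      = (PySem.List.enumerate (spotify.map (fun q => (q.1, q.2, (0 : Int)))) i).map
          (fun p => (2 * p.1 + 1, p.2)) := by
  induction spotify generalizing i with
  | nil => simp [PySem.List.enumerate_nil]
  | cons q l ih => simp [PySem.List.enumerate_cons, ih]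

lemma pv_mem_enumerate_fst_ge {α : Type} (l : List α) (i : Int) (p : Int × α)
    (hp : p ∈ PySem.List.enumerate l i) : i ≤ p.1 := by
  have h : p.1 ∈ (PySem.List.enumerate l i).map (·.1) := List.mem_map_of_mem hp
  rw [PySem.List.map_fst_enumerate] at h
  exact (PySem.List.mem_pyRange_one.mp h).1

lemma pv_enumerate_pairwise {α : Type} (l : List α) (i : Int) :
    (PySem.List.enumerate l i).Pairwise (fun p q => p.1 < q.1) := by
  have h := PySem.List.pairwise_lt_pyRange_one i (i + l.length)
  rw [← PySem.List.map_fst_enumerate, List.pairwise_map] at h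
  exact h

lemma pvRanked_perm (a : List (String × String × Int)) :
    ∀ (b : List (String × String × Int)) (i : Int),
    (pvRanked i a b).Perm
      ((PySem.List.enumerate a i).map (fun p => (2 * p.1, p.2))
        ++ (PySem.List.enumerate b i).map (fun p => (2 * p.1 + 1, p.2))) := by
  induction a with
  | nil => intro b i; simp [pvRanked, PySem.List.enumerate_nil]
  | cons x a ih =>
      intro b i
      cases b with
      | nil => simp [pvRanked, PySem.List.enumerate_nil]
      | cons y b =>
          simp only [pvRanked, PySem.List.enumerate_cons, List.map_cons, List.cons_append]
          refine List.Perm.cons _ ?_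
          refine ((ih b (i + 1)).cons _).trans ?_
          exact List.perm_middle.symm

lemma pvRanked_fst_ge (a : List (String × String × Int)) :
    ∀ (b : List (String × String × Int)) (i : Int) (p : Int × (String × String × Int)),
    p ∈ pvRanked i a b → 2 * i ≤ p.1 := by
  induction a with
  | nil =>
      intro b i p hp
      simp only [pvRanked, List.mem_map] at hp
      obtain ⟨q, hq, rfl⟩ := hp
      have := pv_mem_enumerate_fst_ge b i q hq
      dsimp only; omega
  | cons x a ih =>
      intro b i p hp
      cases b with
      | nil =>
          simp only [pvRanked, List.mem_map] at hp
          obtain ⟨q, hq, rfl⟩ := hp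
          have := pv_mem_enumerate_fst_ge (x :: a) i q hq
          dsimp only; omega
      | cons y b =>
          simp only [pvRanked, List.mem_cons] at hp
          rcases hp with rfl | rfl | hp
          · dsimp only; omega
          · dsimp only; omega
          · have := ih b (i + 1) p hp; omega

lemma pvRanked_pairwise (a : List (String × String × Int)) :
    ∀ (b : List (String × String × Int)) (i : Int),
    (pvRanked i a b).Pairwise (fun p q => p.1 < q.1) := by
  induction a with
  | nil =>
      intro b i
      rw [pvRanked, List.pairwise_map]
      exact (pv_enumerate_pairwise b i).imp (fun h => by omega)
  | cons x a ih =>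
      intro b i
      cases b with
      | nil =>
          rw [pvRanked, List.pairwise_map]
          exact (pv_enumerate_pairwise (x :: a) i).imp (fun h => by omega)
      | cons y b =>
          rw [pvRanked]
          refine List.Pairwise.cons ?_ (List.Pairwise.cons ?_ (ih b (i + 1)))
          · intro q hq
            simp only [List.mem_cons] at hq
            rcases hq with rfl | hq
            · dsimp only; omega
            · have := pvRanked_fst_ge a b (i + 1) q hq; dsimp only; omega
          · intro q hq
            have := pvRanked_fst_ge a b (i + 1) q hq; dsimp only; omega

-- dropping the ranks gives exactly A's traversal order
lemma pvRanked_map_snd (a : List (String × String × Int)) :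
    ∀ (b : List (String × String × Int)) (i : Int),
    (pvRanked i a b).map (·.2)
      = (a.zip b).flatMap (fun p => [p.1, p.2]) ++ (a.drop b.length ++ b.drop a.length) := by
  induction a with
  | nil =>
      intro b i
      simp [pvRanked, Function.comp_def, PySem.List.map_snd_enumerate]
  | cons x a ih =>
      intro b i
      cases b with
      | nil =>
          simp [pvRanked, Function.comp_def, PySem.List.map_snd_enumerate]
      | cons y b =>
          simp only [pvRanked, List.map_cons, List.zip_cons_cons, List.flatMap_cons,
            List.length_cons, List.drop_succ_cons, List.cons_append, List.nil_append]
          rw [ih b (i + 1)]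

-- B's sort reproduces the schedule (ranks are pairwise distinct and increasing there)
lemma pv_sorted_eq_ranked (a b : List (String × String × Int)) :
    PySem.List.sorted
      ((PySem.List.enumerate a 0).map (fun p => (2 * p.1, p.2))
        ++ (PySem.List.enumerate b 0).map (fun p => (2 * p.1 + 1, p.2)))
      (fun p => p.1) false = pvRanked 0 a b :=
  PySem.List.sorted_eq_of_perm_of_pairwise_lt _ _ (fun p => p.1) (pvRanked_perm a b 0) (pvRanked_pairwise a b 0)

-- A's one-entry step, by cases on membership
lemma pvStepA_of_contains (mx : Int) (st : PySem.Set (String × String) × List (String × String × Int))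
    (e : String × String × Int) (h : PySem.Set.contains st.1 (pvKeyA e) = true) :
    pvStepA mx st e = (st, decide (mx ≤ PySem.List.len st.2)) := by
  have hm : pvKeyA e ∈ st.1 := (PySem.Set.contains_iff st.1 (pvKeyA e)).mp h
  simp [pvStepA, hm]

lemma pvStepA_of_not_contains (mx : Int) (st : PySem.Set (String × String) × List (String × String × Int))
    (e : String × String × Int) (h : PySem.Set.contains st.1 (pvKeyA e) = false) :
    pvStepA mx st e
      = ((PySem.Set.add st.1 (pvKeyA e), st.2 ++ [e]), decide (mx ≤ PySem.List.len (st.2 ++ [e]))) := by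
  have hm : pvKeyA e ∉ st.1 := by
    intro hmem
    rw [(PySem.Set.contains_iff st.1 (pvKeyA e)).mpr hmem] at h
    exact Bool.true_eq_false.mp h
  simp [pvStepA, hm]

-- the dedup loops agree: A's (seen, merged) is B's dict's (keys, values)
lemma pvScan_eq (mx : Int) :
    ∀ (rl : List (Int × (String × String × Int)))
      (st : PySem.Set (String × String) × List (String × String × Int))
      (d : PySem.Dict (String × String) (String × String × Int)),
      st.1 = PySem.Dict.keys d → st.2 = PySem.Dict.values d →
      (d.items = [] ∨ (PySem.Dict.size d : Int) < mx) →
      pvRes (pvLoopListA mx (rl.map (·.2)) st) = PySem.Dict.values (pvScanB mx rl d) := by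
  intro rl
  induction rl with
  | nil => intro st d h1 h2 _; simp [pvLoopListA, pvScanB, pvRes, h2]
  | cons p rest ih =>
      obtain ⟨r, e⟩ := p
      intro st d h1 h2 hsz
      have hkey : pvKeyA e = pvKeyB e := rfl
      have hlen : PySem.List.len st.2 = (PySem.Dict.size d : Int) := by
        rw [h2]; simp [PySem.List.len_eq, PySem.Dict.values, PySem.Dict.size]
      by_cases hk : pvKeyB e ∈ PySem.Dict.keys d
      · -- duplicate: both versions skip; A's length check cannot fire since size < mx
        have hcA : PySem.Set.contains st.1 (pvKeyA e) = true := by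
          rw [hkey, h1]; exact (PySem.Set.contains_iff _ _).mpr hk
        have hcB : PySem.Dict.contains d (pvKeyB e) = true :=
          (PySem.Dict.contains_iff_mem_keys d _).mpr hk
        have hne : d.items ≠ [] := by
          intro h; rw [PySem.Dict.keys, h] at hk; simp at hk
        have hlt : (PySem.Dict.size d : Int) < mx := hsz.resolve_left (by exact fun h => hne h)
        have hdec : decide (mx ≤ PySem.List.len st.2) = false := by
          rw [hlen]; simp; omega
        simp only [List.map_cons, pvLoopListA, pvScanB,
          pvStepA_of_contains mx st e hcA, hcB, if_true, hdec, Bool.false_eq_true, if_false]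
        exact ih st d h1 h2 (Or.inr hlt)
      · -- fresh key: A appends to seen/merged, B inserts; both check the same new size
        have hcA : PySem.Set.contains st.1 (pvKeyA e) = false := by
          rw [hkey, h1]
          rw [← Bool.not_eq_true, PySem.Set.contains_iff]
          exact hk
        have hcB : PySem.Dict.contains d (pvKeyB e) = false := by
          rw [← Bool.not_eq_true, PySem.Dict.contains_iff_mem_keys]
          exact hk
        have hitems : (PySem.Dict.insert d (pvKeyB e) e).items = d.items ++ [(pvKeyB e, e)] :=
          PySem.Dict.items_insert_of_not_contains d e hcB
        have hkeys : PySem.Dict.keys (PySem.Dict.insert d (pvKeyB e) e)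
            = PySem.Dict.keys d ++ [pvKeyB e] := by
          simp [PySem.Dict.keys, hitems]
        have hvals : PySem.Dict.values (PySem.Dict.insert d (pvKeyB e) e)
            = PySem.Dict.values d ++ [e] := by
          simp [PySem.Dict.values, hitems]
        have hsz' : (PySem.Dict.size (PySem.Dict.insert d (pvKeyB e) e) : Int)
            = (PySem.Dict.size d : Int) + 1 := by
          simp [PySem.Dict.size, hitems]
        have hlen' : PySem.List.len (st.2 ++ [e])
            = (PySem.Dict.size (PySem.Dict.insert d (pvKeyB e) e) : Int) := by
          simp [PySem.List.len_eq, h2, PySem.Dict.values, PySem.Dict.size, hitems]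
        simp only [List.map_cons, pvLoopListA, pvScanB,
          pvStepA_of_not_contains mx st e hcA, hcB, Bool.false_eq_true, if_false, hlen']
        by_cases hc : decide (mx ≤ (PySem.Dict.size (PySem.Dict.insert d (pvKeyB e) e) : Int)) = true
        · simp [hc, pvRes, hvals, h2]
        · rw [Bool.not_eq_true] at hc
          simp only [hc, Bool.false_eq_true, if_false]
          refine ih _ _ ?_ ?_ (Or.inr ?_)
          · rw [hkeys, h1, hkey]; exact PySem.Set.add_of_not_mem hk
          · simp [hvals, h2]
          · simp only [decide_eq_false_iff_not, not_le] at hc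
            exact hc

-- ===== VERDICT (by name: the statement is the Claim_ definition above) =====
theorem merge_candidates_py_spec : Claim_equal_merge_candidates_py := by
  intro lastfm spotify mx _
  unfold Spec_merge_candidates_py
  simp only [merge_candidates_py_alt]
  rw [pvA_eq_scan, pv_enumerate_map_pad spotify 0,
    pv_sorted_eq_ranked lastfm (spotify.map (fun q => (q.1, q.2, (0 : Int))))]
  have hs := pvRanked_map_snd lastfm (spotify.map (fun q => (q.1, q.2, (0 : Int)))) 0
  simp only [List.length_map] at hs
  rw [← hs]
  exact pvScan_eq mx _ (PySem.Set.empty, []) PySem.Dict.empty rfl rfl (Or.inl rfl)
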